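-- pv_equiv track=rewrite | github.com/epiphany40223/epiphany | media/linux/ps-queries/sync-google-group.py | _member_in_any_ministry
-- ===== SOURCE A (Python) =====
-- def _is_ministry_leader(ministry):
--     if ministry['role'] == 'Chairperson' or \
--        ministry['role'] == 'Staff':
--         return True
--
--     return False
--
-- def _member_in_any_ministry(member, ministries):
--     if 'py ministries' not in member:
--         return False, False
--
--     found = False
--     leader_of_any = False
--     for member_ministry in member['py ministries'].values():
--         member_ministry_name = member_ministry['name']
--         if member_ministry_name in ministries:
--             found = True
--             if _is_ministry_leader(member_ministry):
--                 leader_of_any = True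
--     if found:
--         return found, leader_of_any
--
--     # Didn't find the Member in any of the ministries
--     return False, False
-- ===== SOURCE B (Python) =====
-- def _is_ministry_leader(ministry):
--     return ministry['role'] in ('Chairperson', 'Staff')
--
-- def _member_in_any_ministry(member, ministries):
--     if 'py ministries' not in member:
--         return False, False
--     # phase 1: group the member's ministries into a hash index keyed by ministry name
--     index = {}
--     for m in member['py ministries'].values():
--         index.setdefault(m['name'], []).append(m)
--     # phase 2: scan the wanted ministry names against the index (no inner scan of the
--     # ministries list as in the original; roles are only read for matched groups)
--     found = False
--     leader = False
--     for name in ministries: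
--         group = index.get(name)
--         if group is not None:
--             found = True
--             if not leader:
--                 leader = any(_is_ministry_leader(m) for m in group)
--     return found, leader
-- ===== Notes on version B (the rewrite author's own statement) =====
-- stated objective: alternative
-- what changed: Reverses the traversal: instead of A's loop over the member's ministries with an inner membership scan of the ministries list, B first groups the member's ministries into a dict indexed by name, then iterates over the ministries list doing constant-time index lookups (reading roles only for matched groups).
import Mathlib
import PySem

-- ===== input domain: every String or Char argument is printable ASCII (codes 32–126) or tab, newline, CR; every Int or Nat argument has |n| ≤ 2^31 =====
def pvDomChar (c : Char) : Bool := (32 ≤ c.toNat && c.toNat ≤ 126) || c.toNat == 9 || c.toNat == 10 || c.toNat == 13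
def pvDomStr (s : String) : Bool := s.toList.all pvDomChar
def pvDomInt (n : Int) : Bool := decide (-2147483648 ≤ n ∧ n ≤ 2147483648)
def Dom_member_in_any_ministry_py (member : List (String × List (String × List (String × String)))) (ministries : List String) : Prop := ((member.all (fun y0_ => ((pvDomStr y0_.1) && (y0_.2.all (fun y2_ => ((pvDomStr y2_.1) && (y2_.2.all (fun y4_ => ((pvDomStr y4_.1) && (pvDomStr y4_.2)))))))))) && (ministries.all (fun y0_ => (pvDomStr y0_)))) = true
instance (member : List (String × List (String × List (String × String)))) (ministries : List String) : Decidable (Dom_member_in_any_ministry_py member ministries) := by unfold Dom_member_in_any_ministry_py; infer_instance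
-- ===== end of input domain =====

-- B replaces A's loop-over-member-with-inner-membership-scan by a name-keyed index built from the
-- member followed by a scan of the ministries list (objective: alternative); same results.

-- ===== PORT A =====
-- _is_ministry_leader, as A writes it: an if over two equality tests
def pvIsLeaderA (ministry : List (String × String)) : Bool :=
  if (ministry.lookup "role").getD "" == "Chairperson" || (ministry.lookup "role").getD "" == "Staff" then
    true
  else
    false

def member_in_any_ministry_py (member : List (String × List (String × List (String × String)))) (ministries : List String) : Bool × Bool :=
  match member.lookup "py ministries" with
  | none => (false, false)
  | some pm =>
    let st := (pm.map (·.2)).foldl (fun (st : Bool × Bool) mm =>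
      let memberMinistryName := (mm.lookup "name").getD ""
      if ministries.contains memberMinistryName then
        (true, if pvIsLeaderA mm then true else st.2)
      else st) (false, false)
    if st.1 then st else (false, false)

-- ===== PORT B =====
-- _is_ministry_leader, as B writes it: membership in ('Chairperson', 'Staff')
def pvIsLeaderB (ministry : List (String × String)) : Bool :=
  ["Chairperson", "Staff"].contains ((ministry.lookup "role").getD "")

-- index.setdefault(k, []).append(m) on an insertion-ordered association list
def pvIndexAdd (d : List (String × List (List (String × String)))) (k : String) (m : List (String × String)) : List (String × List (List (String × String))) :=
  match d with
  | [] => [(k, [m])]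
  | (k', g) :: rest => if k' == k then (k', g ++ [m]) :: rest else (k', g) :: pvIndexAdd rest k m

def member_in_any_ministry_py_alt (member : List (String × List (String × List (String × String)))) (ministries : List String) : Bool × Bool :=
  match member.lookup "py ministries" with
  | none => (false, false)
  | some pm =>
    -- phase 1: group the member's ministries by name
    let index := (pm.map (·.2)).foldl (fun d mm => pvIndexAdd d ((mm.lookup "name").getD "") mm) []
    -- phase 2: scan the wanted names against the index
    ministries.foldl (fun (st : Bool × Bool) name =>
      match index.lookup name with
      | none => st
      | some group => (true, if st.2 then st.2 else group.any pvIsLeaderB)) (false, false)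

-- ===== PRECONDITION & SPEC =====
-- Pre_ excludes exactly the inputs on which the Python A raises KeyError: a ministry dict under
-- 'py ministries' lacking the key 'name', or lacking 'role' while its name matches.
def Pre_member_in_any_ministry_py (member : List (String × List (String × List (String × String)))) (ministries : List String) : Prop :=
  ∀ p ∈ ((member.lookup "py ministries").getD []),
    (p.2.lookup "name").isSome = true ∧
    (ministries.contains ((p.2.lookup "name").getD "") = true → (p.2.lookup "role").isSome = true)
instance (member : List (String × List (String × List (String × String)))) (ministries : List String) : Decidable (Pre_member_in_any_ministry_py member ministries) := by unfold Pre_member_in_any_ministry_py; infer_instance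

def pvWitness_member_in_any_ministry_py : (List (String × List (String × List (String × String)))) × List String :=
  ([("py ministries", [("m1", [("name", "choir"), ("role", "Staff")])])], ["choir"])

def Spec_member_in_any_ministry_py (member : List (String × List (String × List (String × String)))) (ministries : List String) (out : Bool × Bool) : Prop := out = member_in_any_ministry_py_alt member ministries
instance (member : List (String × List (String × List (String × String)))) (ministries : List String) (out : Bool × Bool) : Decidable (Spec_member_in_any_ministry_py member ministries out) := by unfold Spec_member_in_any_ministry_py; infer_instance

-- ===== CLAIM (what is proved, stated in full; the proofs are below) =====
def Claim_equal_member_in_any_ministry_py : Prop := ∀ (member : List (String × List (String × List (String × String)))) (ministries : List String), Dom_member_in_any_ministry_py member ministries → Pre_member_in_any_ministry_py member ministries → Spec_member_in_any_ministry_py member ministries (member_in_any_ministry_py member ministries)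

-- ===== LEMMAS AND PROOFS =====

-- the two phrasings of _is_ministry_leader agree
theorem pvIsLeader_eq (mm : List (String × String)) : pvIsLeaderA mm = pvIsLeaderB mm := by
  unfold pvIsLeaderA pvIsLeaderB
  cases h : ((mm.lookup "role").getD "" == "Chairperson" || (mm.lookup "role").getD "" == "Staff") <;>
    simp_all

-- A's fold computes (any-match, any-leader-among-matches) from any starting flags
theorem pvFoldA (p q : List (String × String) → Bool) (vals : List (List (String × String))) (a b : Bool) :
    vals.foldl (fun (st : Bool × Bool) mm =>
      if p mm then (true, if q mm then true else st.2) else st) (a, b)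
    = (a || vals.any p, b || vals.any (fun mm => p mm && q mm)) := by
  induction vals generalizing a b with
  | nil => simp
  | cons x xs ih =>
    cases hp : p x <;> cases hq : q x <;>
      simp only [List.foldl_cons, hp, hq, Bool.false_eq_true, if_false, if_true,
        List.any_cons] <;>
      rw [ih] <;> simp

-- B's phase-2 fold computes (any-hit, any-leader-in-a-hit-group) from any starting flags
theorem pvFoldB (f : String → Option (List (List (String × String)))) (L : List (String × String) → Bool)
    (names : List String) (a b : Bool) :
    names.foldl (fun (st : Bool × Bool) n =>
      match f n with
      | none => st
      | some group => (true, if st.2 then st.2 else group.any L)) (a, b)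
    = (a || names.any (fun n => (f n).isSome), b || names.any (fun n => ((f n).getD []).any L)) := by
  induction names generalizing a b with
  | nil => simp
  | cons x xs ih =>
    cases hf : f x with
    | none => simp only [List.foldl_cons, hf, List.any_cons]; rw [ih]; simp
    | some g =>
      simp only [List.foldl_cons, hf, List.any_cons]
      rw [ih]
      cases b <;> simp

-- lookup after a setdefault-append
theorem pvIndexAdd_lookup (d : List (String × List (List (String × String)))) (k k' : String) (m : List (String × String)) :
    (pvIndexAdd d k m).lookup k' =
      if k' == k then some ((d.lookup k).getD [] ++ [m]) else d.lookup k' := by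
  induction d with
  | nil => by_cases h : k' = k <;> simp [pvIndexAdd, h]
  | cons p rest ih =>
    obtain ⟨k0, g⟩ := p
    simp only [pvIndexAdd]
    by_cases h0 : k0 = k
    · subst h0
      simp only [beq_self_eq_true, if_true, List.lookup]
      by_cases h1 : k' = k0
      · subst h1; simp
      · simp [(by simpa using h1 : (k' == k0) = false)]
    · simp only [(by simpa using h0 : (k0 == k) = false), Bool.false_eq_true, if_false, List.lookup]
      by_cases h1 : k' = k0
      · subst h1
        simp [(by simpa using h0 : (k' == k) = false)]
      · rw [show (k' == k0) = false by simpa using h1]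
        rw [ih]
        by_cases h2 : k' = k
        · subst h2
          simp [(by simpa using fun e => h0 e.symm : (k' == k0) = false)]
        · simp [(by simpa using h2 : (k' == k) = false)]

-- the built index: presence of a key ↔ some ministry bears that name
theorem pvIndex_isSome (nm : List (String × String) → String) (vals : List (List (String × String)))
    (k : String) : ∀ d : List (String × List (List (String × String))),
    ((vals.foldl (fun d mm => pvIndexAdd d (nm mm) mm) d).lookup k).isSome
      = ((d.lookup k).isSome || vals.any (fun mm => nm mm == k)) := by
  induction vals with
  | nil => intro d; simp
  | cons x xs ih =>
    intro d
    simp only [List.foldl_cons, List.any_cons]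
    rw [ih, pvIndexAdd_lookup]
    by_cases h : k = nm x
    · simp [h]
    · simp [(by simpa using h : (k == nm x) = false),
        (by simpa using fun e => h e.symm : (nm x == k) = false)]

-- the built index: the group under a key is the list of ministries bearing that name
theorem pvIndex_getD (nm : List (String × String) → String) (vals : List (List (String × String)))
    (k : String) : ∀ d : List (String × List (List (String × String))),
    ((vals.foldl (fun d mm => pvIndexAdd d (nm mm) mm) d).lookup k).getD []
      = (d.lookup k).getD [] ++ vals.filter (fun mm => nm mm == k) := by
  induction vals with
  | nil => intro d; simp
  | cons x xs ih =>
    intro d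
    simp only [List.foldl_cons, List.filter_cons]
    rw [ih, pvIndexAdd_lookup]
    by_cases h : k = nm x
    · simp [h]
    · simp [(by simpa using h : (k == nm x) = false),
        (by simpa using fun e => h e.symm : (nm x == k) = false)]

-- exchanging the two quantifiers: scanning names against the member = scanning the member against names
theorem pvAnySwap (nm : List (String × String) → String) (q : List (String × String) → Bool)
    (vals : List (List (String × String))) (names : List String) :
    names.any (fun n => vals.any (fun mm => nm mm == n && q mm))
      = vals.any (fun mm => names.contains (nm mm) && q mm) := by
  rw [Bool.eq_iff_iff]
  simp only [List.any_eq_true, Bool.and_eq_true, beq_iff_eq, List.contains_iff_exists_mem_beq]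
  constructor
  · rintro ⟨n, hn, mm, hmm, rfl, hq⟩; exact ⟨mm, hmm, ⟨⟨nm mm, hn, by simp⟩, hq⟩⟩
  · rintro ⟨mm, hmm, ⟨n, hn, he⟩, hq⟩
    exact ⟨n, hn, mm, hmm, by simpa using he, hq⟩

theorem member_in_any_ministry_py_eq (member : List (String × List (String × List (String × String)))) (ministries : List String) :
    member_in_any_ministry_py member ministries = member_in_any_ministry_py_alt member ministries := by
  unfold member_in_any_ministry_py member_in_any_ministry_py_alt
  cases member.lookup "py ministries" with
  | none => rfl
  | some pm =>
    simp only [pvFoldA, pvFoldB, Bool.false_or]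
    have h1 : ∀ n, (List.lookup n ((pm.map (·.2)).foldl (fun d mm => pvIndexAdd d ((mm.lookup "name").getD "") mm) [])).isSome
        = (pm.map (·.2)).any (fun mm => (mm.lookup "name").getD "" == n) := by
      intro n
      rw [pvIndex_isSome]
      simp
    have h2 : ∀ n, ((List.lookup n ((pm.map (·.2)).foldl (fun d mm => pvIndexAdd d ((mm.lookup "name").getD "") mm) [])).getD []).any pvIsLeaderB
        = (pm.map (·.2)).any (fun mm => ((mm.lookup "name").getD "" == n) && pvIsLeaderB mm) := by
      intro n
      rw [pvIndex_getD]
      simp [List.any_filter]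
    simp only [h1, h2]
    have hsw1 := pvAnySwap (fun mm => (mm.lookup "name").getD "") (fun _ => true) (pm.map (·.2)) ministries
    simp only [Bool.and_true] at hsw1
    have hsw2 := pvAnySwap (fun mm => (mm.lookup "name").getD "") pvIsLeaderB (pm.map (·.2)) ministries
    rw [show pvIsLeaderA = pvIsLeaderB from funext pvIsLeader_eq]
    rw [hsw1, hsw2]
    cases hF : (pm.map (·.2)).any (fun mm => ministries.contains ((mm.lookup "name").getD "")) with
    | true => simp only [if_true]
    | false =>
      have hLd : (pm.map (·.2)).any (fun mm => ministries.contains ((mm.lookup "name").getD "") && pvIsLeaderB mm) = false := by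
        rw [List.any_eq_false] at hF ⊢
        intro mm hmm
        have h : ministries.contains ((mm.lookup "name").getD "") = false := by
          have := hF mm hmm; revert this
          cases ministries.contains ((mm.lookup "name").getD "") <;> simp
        simp only [Bool.not_eq_true, h, Bool.false_and]
      simp only [hLd, Bool.false_eq_true, if_false]

-- ===== VERDICT (by name: the statement is the Claim_ definition above) =====
theorem member_in_any_ministry_py_spec : Claim_equal_member_in_any_ministry_py := by
  intro member ministries _ _
  unfold Spec_member_in_any_ministry_py
  exact member_in_any_ministry_py_eq member ministries
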